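-- pv_equiv track=rewrite | github.com/Xiaoxuan-Val/comp30024-AI | search/__main__.py | path_search
-- ===== SOURCE A (Python) =====
-- def get_dist(g_dist, curr_pos, goal_pos):
--     #using Manhattan distance as heuristic
--     h_dist = abs(curr_pos[0]-goal_pos[0]) + abs(curr_pos[1]-goal_pos[1])
--     f_dist = g_dist + h_dist
--     return f_dist
--
-- def path_search(whitetoken, goal_position, blacktoken_dict):
--
--     #using a list to record position we have already reached
--     path_list = [whitetoken]
--     #a dictionary to record cost already spend for each point
--     path_dict = {whitetoken: 0}
--     #another list to record position that cannot go anywhere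
--     failedposition_list = []
--
--
--     while path_list[-1]!= goal_position :
--
--         #current location
--         temp_pos = path_list[-1]
--
--         x = temp_pos[0]
--         y = temp_pos[1]
--
--         g_dist =path_dict[temp_pos] + 1
--
--         #valid next position
--         possible_pos = [(x, y-1), (x, y+1), (x-1, y), (x+1, y)]
--
--         #remove points outside the board and occupied by black tokens
--         index = len(possible_pos) - 1
--         while index >= 0 :
--             if possible_pos[index][0] < 0 or possible_pos[index][1] < 0 or possible_pos[index][0] > 7 or possible_pos[index][1] > 7 or (possible_pos[index] in blacktoken_dict):
--                 possible_pos.pop(index)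
--             index = index - 1
--
--         #remove point already passed by
--         for p in path_dict:
--             if p in possible_pos:
--                 possible_pos.remove(p)
--         #remove position already failed
--         for p in failedposition_list:
--             if p in possible_pos:
--                 possible_pos.remove(p)
--         #if no possible next position
--         if len(possible_pos) == 0:
--             failedposition_list.append(path_list.pop())
--              #no solution path
--             if len(path_list) == 0:
--                 return []
--             continue
--         #sort possible next positions by estimated total cost f
--         next_point = possible_pos[0]
--         min_dist = get_dist(g_dist, next_point, goal_position)
--         for p in possible_pos:
--             if get_dist(g_dist, p, goal_position) < min_dist:
--                 next_point = p
--                 min_dist = get_dist(g_dist, p, goal_position)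
--
--         path_list.append(next_point)
--         path_dict.update({next_point:g_dist})
--
--
--     return path_list
-- ===== SOURCE B (Python) =====
-- def path_search(whitetoken, goal_position, blacktoken_dict):
--     # Recursive DFS with one persistent visited set, replacing A's explicit
--     # stack machine with its cost dictionary and failed-position list.
--     visited = {whitetoken}
--
--     def dfs(pos):
--         if pos == goal_position:
--             return [pos]
--         x, y = pos
--         cands = [q for q in [(x, y - 1), (x, y + 1), (x - 1, y), (x + 1, y)]
--                  if 0 <= q[0] <= 7 and 0 <= q[1] <= 7
--                  and q not in blacktoken_dict and q not in visited]
--         if not cands: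
--             return []
--         nxt = min(cands, key=lambda q: abs(q[0] - goal_position[0]) + abs(q[1] - goal_position[1]))
--         visited.add(nxt)
--         rest = dfs(nxt)
--         return [pos] + rest if rest else dfs(pos)
--
--     return dfs(whitetoken)
-- ===== Notes on version B (the rewrite author's own statement) =====
-- stated objective: alternative
-- what changed: A's iterative stack machine (explicit path list popped on dead ends, a cost dictionary and a redundant failed-position list, with a hand-rolled backwards pop-loop filter and a manual min-scan) is replaced by a recursive DFS: one persistent visited set initialised with the start, a single list-comprehension candidate filter, min() with a Manhattan-distance key, and backtracking expressed as recursion.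
import Mathlib
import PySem

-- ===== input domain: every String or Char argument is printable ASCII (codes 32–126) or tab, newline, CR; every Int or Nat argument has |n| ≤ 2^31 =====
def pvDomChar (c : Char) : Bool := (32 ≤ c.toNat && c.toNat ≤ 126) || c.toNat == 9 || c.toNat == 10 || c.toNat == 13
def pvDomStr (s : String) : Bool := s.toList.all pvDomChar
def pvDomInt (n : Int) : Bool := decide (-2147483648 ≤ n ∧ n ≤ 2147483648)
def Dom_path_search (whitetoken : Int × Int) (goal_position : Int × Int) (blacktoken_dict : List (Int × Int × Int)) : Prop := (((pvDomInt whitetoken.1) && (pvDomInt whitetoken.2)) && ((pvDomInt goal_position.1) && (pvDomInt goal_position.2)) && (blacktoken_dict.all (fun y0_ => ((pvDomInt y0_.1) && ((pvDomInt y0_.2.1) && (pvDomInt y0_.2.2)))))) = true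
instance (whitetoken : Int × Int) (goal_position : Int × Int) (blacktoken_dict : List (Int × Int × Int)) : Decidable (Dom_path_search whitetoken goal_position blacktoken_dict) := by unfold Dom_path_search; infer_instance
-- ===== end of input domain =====

-- B re-implements A's explicit stack machine (cost dict + failed list) as a recursive DFS over one
-- persistent visited set; equally fast on this fixed 8x8 board (objective: alternative decomposition).

-- ===== PORT A =====

-- `q in blacktoken_dict` (membership among the dict's (x,y) keys; both Pythons do this same test)
def aBlackMem (bt : List (Int × Int × Int)) (q : Int × Int) : Bool :=
  bt.any (fun t => (t.1, t.2.1) == q)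

def get_dist (g_dist : Int) (curr_pos goal_pos : Int × Int) : Int :=
  let h_dist := |curr_pos.1 - goal_pos.1| + |curr_pos.2 - goal_pos.2|
  g_dist + h_dist

-- the backwards `while index >= 0 : … possible_pos.pop(index)` filtering loop
def aPruneLoop (bt : List (Int × Int × Int)) (idx : Int) (l : List (Int × Int)) :
    List (Int × Int) :=
  if _h : 0 ≤ idx then
    let l' := match PySem.List.pyGet? l idx with
      | some q =>
          if q.1 < 0 || q.2 < 0 || q.1 > 7 || q.2 > 7 || aBlackMem bt q then
            l.eraseIdx idx.toNat
          else l
      | none => l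
    aPruneLoop bt (idx - 1) l'
  else l
termination_by (idx + 1).toNat
decreasing_by omega

-- the main `while path_list[-1] != goal_position` loop (fuel only makes it total; 200 always suffices)
def aLoop (goal : Int × Int) (bt : List (Int × Int × Int)) :
    Nat → List (Int × Int) → PySem.Dict (Int × Int) Int → List (Int × Int) → List (Int × Int)
  | 0, _, _, _ => []
  | fuel + 1, path_list, path_dict, failed =>
    match path_list.getLast? with
    | none => []          -- unreachable: path_list is never empty at the loop head
    | some temp_pos =>
      if temp_pos = goal then path_list
      else
        let x := temp_pos.1
        let y := temp_pos.2
        match path_dict.get? temp_pos with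
        | none => []      -- unreachable: every stacked position is a dict key
        | some c =>
          let g_dist := c + 1
          let possible0 : List (Int × Int) := [(x, y-1), (x, y+1), (x-1, y), (x+1, y)]
          let possible1 := aPruneLoop bt ((possible0.length : Int) - 1) possible0
          let possible2 := (path_dict.keys).foldl
            (fun l p => if l.contains p then l.erase p else l) possible1
          let possible3 := failed.foldl
            (fun l p => if l.contains p then l.erase p else l) possible2
          if possible3.isEmpty then
            let failed' := failed ++ [temp_pos]
            let path' := path_list.dropLast
            if path'.isEmpty then [] else aLoop goal bt fuel path' path_dict failed'
          else
            match possible3 with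
            | [] => []    -- unreachable: possible3 is nonempty here
            | c0 :: _ =>
              let r := possible3.foldl
                (fun (acc : (Int × Int) × Int) p =>
                  if get_dist g_dist p goal < acc.2 then (p, get_dist g_dist p goal) else acc)
                (c0, get_dist g_dist c0 goal)
              let next_point := r.1
              aLoop goal bt fuel (path_list ++ [next_point])
                (path_dict.insert next_point g_dist) failed

def path_search (whitetoken : Int × Int) (goal_position : Int × Int)
    (blacktoken_dict : List (Int × Int × Int)) : List (Int × Int) :=
  aLoop goal_position blacktoken_dict 200 [whitetoken]
    (PySem.Dict.ofList [(whitetoken, (0 : Int))]) []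

-- ===== PORT B =====

-- Manhattan distance to the goal, min's key
def bMan (goal q : Int × Int) : Int := |q.1 - goal.1| + |q.2 - goal.2|

-- `dfs(pos)` threading the mutated persistent `visited` set (fuel only makes it total; 200 suffices)
def bDfs (goal : Int × Int) (bt : List (Int × Int × Int)) :
    Nat → PySem.Set (Int × Int) → (Int × Int) → List (Int × Int) × PySem.Set (Int × Int)
  | 0, vis, _ => ([], vis)
  | fuel + 1, vis, pos =>
    if pos = goal then ([pos], vis)
    else
      let x := pos.1
      let y := pos.2
      let cands := [(x, y-1), (x, y+1), (x-1, y), (x+1, y)].filter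
        (fun q => 0 ≤ q.1 && q.1 ≤ 7 && 0 ≤ q.2 && q.2 ≤ 7 &&
          !aBlackMem bt q && !PySem.Set.contains vis q)
      match PySem.List.min? cands (bMan goal) with
      | none => ([], vis)                      -- `if not cands: return []`
      | some nxt =>
        let vis' := PySem.Set.add vis nxt
        match bDfs goal bt fuel vis' nxt with
        | (rest, vis'') =>
          if rest.isEmpty then bDfs goal bt fuel vis'' pos else (pos :: rest, vis'')

def path_search_alt (whitetoken : Int × Int) (goal_position : Int × Int)
    (blacktoken_dict : List (Int × Int × Int)) : List (Int × Int) :=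
  (bDfs goal_position blacktoken_dict 200 (PySem.Set.ofList [whitetoken]) whitetoken).1

-- ===== PRECONDITION & SPEC =====
def Spec_path_search (whitetoken : Int × Int) (goal_position : Int × Int) (blacktoken_dict : List (Int × Int × Int)) (out : List (Int × Int)) : Prop := out = path_search_alt whitetoken goal_position blacktoken_dict
instance (whitetoken : Int × Int) (goal_position : Int × Int) (blacktoken_dict : List (Int × Int × Int)) (out : List (Int × Int)) : Decidable (Spec_path_search whitetoken goal_position blacktoken_dict out) := by unfold Spec_path_search; infer_instance

-- ===== CLAIM (what is proved, stated in full; the proofs are below) =====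
def Claim_equal_path_search : Prop := ∀ (whitetoken : Int × Int) (goal_position : Int × Int) (blacktoken_dict : List (Int × Int × Int)), Dom_path_search whitetoken goal_position blacktoken_dict → Spec_path_search whitetoken goal_position blacktoken_dict (path_search whitetoken goal_position blacktoken_dict)

-- ===== LEMMAS AND PROOFS =====

-- neighbour list, board cells, and the count of unvisited board cells (the termination measure)
def nbrs (p : Int × Int) : List (Int × Int) :=
  [(p.1, p.2-1), (p.1, p.2+1), (p.1-1, p.2), (p.1+1, p.2)]

def bcells : List (Int × Int) :=
  (List.range 8).flatMap (fun i => (List.range 8).map (fun j => ((i : Int), (j : Int))))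

def ucnt (V : PySem.Set (Int × Int)) : Nat := bcells.countP (fun c => !V.contains c)

theorem nbrs_nodup (p : Int × Int) : (nbrs p).Nodup := by
  simp [nbrs, Prod.ext_iff]
  omega

theorem mem_bcells (q : Int × Int) :
    q ∈ bcells ↔ (0 ≤ q.1 ∧ q.1 ≤ 7 ∧ 0 ≤ q.2 ∧ q.2 ≤ 7) := by
  obtain ⟨a, b⟩ := q
  simp [bcells, List.mem_flatMap, List.mem_range, Prod.ext_iff]
  constructor
  · rintro ⟨⟨i, hi, rfl⟩, ⟨j, hj, rfl⟩⟩; omega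
  · rintro ⟨h1, h2, h3, h4⟩
    exact ⟨⟨a.toNat, by omega, by omega⟩, ⟨b.toNat, by omega, by omega⟩⟩

theorem countP_strict {l : List (Int × Int)} {p : Int × Int → Bool} {n : Int × Int}
    (hn : n ∈ l) (hp : p n = true) :
    l.countP (fun c => p c && !(c == n)) < l.countP p := by
  induction l with
  | nil => simp at hn
  | cons a t ih =>
    rcases List.mem_cons.mp hn with rfl | hmem
    · simp only [List.countP_cons, hp, beq_self_eq_true, Bool.not_true, Bool.and_false]
      have := List.countP_mono_left (l := t)
        (p := fun c => p c && !(c == n)) (q := p) (fun x _ h => by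
          simp only [Bool.and_eq_true] at h; exact h.1)
      simp at this ⊢
      omega
    · have := ih hmem
      simp only [List.countP_cons]
      rcases h : (p a && !(a == n)) with _ | _ <;> rcases h2 : p a <;> simp_all <;> omega

theorem ucnt_add_lt {V : PySem.Set (Int × Int)} {n : Int × Int}
    (hb : n ∈ bcells) (hv : ¬ n ∈ V) : ucnt (PySem.Set.add V n) < ucnt V := by
  have hadd : PySem.Set.add V n = V ++ [n] := by
    simp only [PySem.Set.add, PySem.Set.contains]
    rw [if_neg (by simp [hv])]
  rw [ucnt, ucnt, hadd]
  rw [List.countP_congr (p := fun c => !(V ++ [n] : List (Int × Int)).contains c)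
    (q := fun c => (!V.contains c) && !(c == n)) (fun c _ => by
    by_cases h1 : c ∈ V <;> by_cases h2 : c = n <;> simp [h1, h2])]
  exact countP_strict hb (by simp [hv])

theorem ucnt_mono {V W : PySem.Set (Int × Int)}
    (h : ∀ x, x ∈ V → x ∈ W) : ucnt W ≤ ucnt V := by
  apply List.countP_mono_left
  intro x _ hx
  by_cases hxV : x ∈ V
  · exfalso; revert hx; simp [h x hxV]
  · revert hx; simp [hxV]

-- ---- min / scan lemmas ----

theorem foldl_some {α κ : Type} [LT κ] [DecidableLT κ] (key : α → κ) :
    ∀ (t : List α) (x : α),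
      List.foldl (fun acc y => match acc with
        | none => some y
        | some m => if key y < key m then some y else some m) (some x) t
      = some (t.foldl (fun m y => if key y < key m then y else m) x) := by
  intro t
  induction t with
  | nil => intro x; rfl
  | cons a t ih =>
    intro x
    simp only [List.foldl_cons]
    by_cases h : key a < key x <;> simp [h, ih]

theorem min?_cons {α κ : Type} [LT κ] [DecidableLT κ] (key : α → κ) (x : α) (t : List α) :
    PySem.List.min? (x :: t) key
      = some (t.foldl (fun m y => if key y < key m then y else m) x) := by
  simp only [PySem.List.min?, List.foldl_cons]
  exact foldl_some key t x

theorem scan_fst (g : Int) (goal : Int × Int) :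
    ∀ (t : List (Int × Int)) (c0 : Int × Int),
      (t.foldl (fun (acc : (Int × Int) × Int) p =>
          if get_dist g p goal < acc.2 then (p, get_dist g p goal) else acc)
        (c0, get_dist g c0 goal)).1
      = t.foldl (fun m y => if bMan goal y < bMan goal m then y else m) c0 := by
  intro t
  induction t with
  | nil => intro c0; rfl
  | cons a t ih =>
    intro c0
    have hiff : get_dist g a goal < get_dist g c0 goal ↔ bMan goal a < bMan goal c0 := by
      simp only [get_dist, bMan]; omega
    simp only [List.foldl_cons]
    by_cases h : bMan goal a < bMan goal c0
    · rw [if_pos (hiff.mpr h), if_pos h]; exact ih a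
    · rw [if_neg (fun hc => h (hiff.mp hc)), if_neg h]; exact ih c0

theorem scan_min? (g : Int) (goal c0 : Int × Int) (t : List (Int × Int)) :
    PySem.List.min? (c0 :: t) (bMan goal)
      = some (((c0 :: t).foldl (fun (acc : (Int × Int) × Int) p =>
          if get_dist g p goal < acc.2 then (p, get_dist g p goal) else acc)
        (c0, get_dist g c0 goal)).1) := by
  rw [min?_cons]
  congr 1
  rw [List.foldl_cons, if_neg (by omega), scan_fst]

-- ---- the backwards pop loop is a filter ----

def condA (bt : List (Int × Int × Int)) (q : Int × Int) : Bool :=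
  q.1 < 0 || q.2 < 0 || q.1 > 7 || q.2 > 7 || aBlackMem bt q

theorem aPruneLoop_neg (bt : List (Int × Int × Int)) (idx : Int) (l : List (Int × Int))
    (h : idx < 0) : aPruneLoop bt idx l = l := by
  rw [aPruneLoop]
  simp [show ¬ (0 ≤ idx) by omega]

theorem aPruneLoop_step (bt : List (Int × Int × Int)) (idx : Int) (l : List (Int × Int))
    (h : 0 ≤ idx) :
    aPruneLoop bt idx l = aPruneLoop bt (idx - 1)
      (match PySem.List.pyGet? l idx with
       | some q => if condA bt q then l.eraseIdx idx.toNat else l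
       | none => l) := by
  rw [aPruneLoop, dif_pos h]
  simp only [condA]
  rfl

theorem aPruneLoop_step_some (bt : List (Int × Int × Int)) (idx : Int) (l : List (Int × Int))
    (q : Int × Int) (h : 0 ≤ idx) (hq : PySem.List.pyGet? l idx = some q) :
    aPruneLoop bt idx l
      = aPruneLoop bt (idx - 1) (if condA bt q then l.eraseIdx idx.toNat else l) := by
  rw [aPruneLoop_step _ _ _ h, hq]

theorem pyGet?_toNat {α : Type} (l : List α) (idx : Int) (h : 0 ≤ idx) :
    PySem.List.pyGet? l idx = l[idx.toNat]? := by
  obtain ⟨n, rfl⟩ : ∃ n : Nat, idx = (n : Int) := ⟨idx.toNat, by omega⟩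
  simp [PySem.List.pyGet?_natCast]

theorem aPruneLoop_append (bt : List (Int × Int × Int)) :
    ∀ (n : Nat) (idx : Int) (m : List (Int × Int)) (a : Int × Int),
      idx + 1 ≤ n → idx < m.length →
      aPruneLoop bt idx (m ++ [a]) = aPruneLoop bt idx m ++ [a] := by
  intro n
  induction n with
  | zero => intro idx m a h1 _; rw [aPruneLoop_neg _ _ _ (by omega), aPruneLoop_neg _ _ _ (by omega)]
  | succ n ih =>
    intro idx m a h1 h2
    by_cases h0 : 0 ≤ idx
    · have hlt : idx.toNat < m.length := by omega
      have hg1 : PySem.List.pyGet? (m ++ [a]) idx = some (m[idx.toNat]) := by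
        rw [pyGet?_toNat _ _ h0, List.getElem?_append_left hlt, List.getElem?_eq_getElem hlt]
      have hg2 : PySem.List.pyGet? m idx = some (m[idx.toNat]) := by
        rw [pyGet?_toNat _ _ h0, List.getElem?_eq_getElem hlt]
      rw [aPruneLoop_step_some _ _ _ _ h0 hg1, aPruneLoop_step_some _ _ _ _ h0 hg2]
      by_cases hq : condA bt (m[idx.toNat]) = true
      · rw [if_pos hq, if_pos hq, List.eraseIdx_append_of_lt_length hlt]
        refine ih _ _ _ ?_ ?_
        · omega
        · rw [List.length_eraseIdx_of_lt hlt]; omega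
      · rw [if_neg hq, if_neg hq]
        refine ih _ _ _ ?_ ?_ <;> omega
    · rw [aPruneLoop_neg _ _ _ (by omega), aPruneLoop_neg _ _ _ (by omega)]

theorem aPruneLoop_filter (bt : List (Int × Int × Int)) :
    ∀ (l : List (Int × Int)),
      aPruneLoop bt ((l.length : Int) - 1) l = l.filter (fun q => !condA bt q) := by
  intro l
  induction l using List.reverseRecOn with
  | nil => rw [aPruneLoop_neg _ _ _ (by simp)]; rfl
  | append_singleton m a ih =>
    have hlen : (((m ++ [a]).length : Int)) - 1 = (m.length : Int) := by simp
    have hg : PySem.List.pyGet? (m ++ [a]) ((m.length : Int)) = some a := by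
      rw [pyGet?_toNat _ _ (by omega), show ((m.length : Int)).toNat = m.length by omega,
        List.getElem?_append_right (le_refl _)]
      simp
    rw [hlen, aPruneLoop_step_some _ _ _ _ (by omega) hg]
    rw [show ((m.length : Int)).toNat = m.length by omega]

    by_cases hca : condA bt a = true
    · rw [if_pos hca]
      rw [List.eraseIdx_append_of_length_le (le_refl _)]
      simp only [Nat.sub_self, List.eraseIdx_cons_zero, List.append_nil]
      rw [show ((m.length : Int)) - 1 = ((m.length : Int)) - 1 from rfl, ih, List.filter_append]
      simp [hca]
    · rw [if_neg hca]
      have hca' : condA bt a = false := by simpa using hca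
      rw [aPruneLoop_append bt (m.length + 1) _ _ _ (by omega) (by omega), ih,
        List.filter_append]
      simp [hca']

-- ---- the remove loops are filters ----

theorem erase_foldl_filter :
    ∀ (ks l : List (Int × Int)), l.Nodup →
      ks.foldl (fun l p => if l.contains p then l.erase p else l) l
        = l.filter (fun q => !ks.contains q) := by
  intro ks
  induction ks with
  | nil => intro l _; simp
  | cons k ks ih =>
    intro l hnd
    simp only [List.foldl_cons]
    have hstep : (if l.contains k then l.erase k else l) = l.filter (fun q => q != k) := by
      by_cases hc : k ∈ l
      · rw [if_pos (by simp [hc]), hnd.erase_eq_filter]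
      · rw [if_neg (by simp [hc])]
        rw [eq_comm, List.filter_eq_self]
        intro a ha
        rw [bne_iff_ne]
        rintro rfl
        exact hc ha
    rw [hstep, ih _ (hnd.filter _), List.filter_filter]
    apply List.filter_congr
    intro a _
    by_cases h : a = k <;> simp [List.contains_cons, Bool.not_or, h]

-- ---- the A-side candidate chain equals B's single filter ----

def candL (bt : List (Int × Int × Int)) (V : PySem.Set (Int × Int)) (pos : Int × Int) :
    List (Int × Int) :=
  (nbrs pos).filter (fun q => 0 ≤ q.1 && q.1 ≤ 7 && 0 ≤ q.2 && q.2 ≤ 7 &&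
    !aBlackMem bt q && !PySem.Set.contains V q)

theorem cand_eq (bt : List (Int × Int × Int)) (dict : PySem.Dict (Int × Int) Int)
    (failed : List (Int × Int)) (V : PySem.Set (Int × Int))
    (hRel : ∀ q : Int × Int, (q ∈ dict.keys ∨ q ∈ failed) ↔ q ∈ V) (p : Int × Int) :
    failed.foldl (fun l p => if l.contains p then l.erase p else l)
      ((dict.keys).foldl (fun l p => if l.contains p then l.erase p else l)
        (aPruneLoop bt (((nbrs p).length : Int) - 1) (nbrs p)))
    = candL bt V p := by
  simp only [candL]
  rw [aPruneLoop_filter]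
  rw [erase_foldl_filter _ _ ((nbrs_nodup p).filter _)]
  rw [erase_foldl_filter _ _ (((nbrs_nodup p).filter _).filter _)]
  rw [List.filter_filter, List.filter_filter]
  apply List.filter_congr
  intro q _
  by_cases h1 : q ∈ V
  · have h2 : PySem.Set.contains V q = true := by simp [PySem.Set.contains, h1]
    rcases (hRel q).mpr h1 with h | h <;> simp [h2, h, h1]
  · have hk : q ∉ dict.keys := fun hh => h1 ((hRel q).mp (Or.inl hh))
    have hf : q ∉ failed := fun hh => h1 ((hRel q).mp (Or.inr hh))
    have hv : PySem.Set.contains V q = false := by simp [PySem.Set.contains, h1]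
    rcases hbm : aBlackMem bt q with _ | _
    · rw [Bool.eq_iff_iff]
      simp [condA, hbm, hk, hf, hv, h1]
      omega
    · simp [condA, hbm, hk, hf, hv, h1]


-- ---- B-side machinery: candidate list, unfolding equations, monotonicity, fuel stability ----

theorem bDfs_succ (g : Int × Int) (bt : List (Int × Int × Int)) (f : Nat)
    (V : PySem.Set (Int × Int)) (pos : Int × Int) :
    bDfs g bt (f+1) V pos =
      (if pos = g then ([pos], V)
      else match PySem.List.min? (candL bt V pos) (bMan g) with
        | none => ([], V)
        | some nxt =>
          match bDfs g bt f (PySem.Set.add V nxt) nxt with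
          | (rest, vis'') =>
            if rest.isEmpty then bDfs g bt f vis'' pos else (pos :: rest, vis'')) := rfl

theorem bDfs_goal (g : Int × Int) (bt : List (Int × Int × Int)) (f : Nat)
    (V : PySem.Set (Int × Int)) (pos : Int × Int) (hg : pos = g) :
    bDfs g bt (f+1) V pos = ([pos], V) := by
  rw [bDfs_succ, if_pos hg]

theorem bDfs_none (g : Int × Int) (bt : List (Int × Int × Int)) (f : Nat)
    (V : PySem.Set (Int × Int)) (pos : Int × Int) (hg : ¬ pos = g)
    (hm : PySem.List.min? (candL bt V pos) (bMan g) = none) :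
    bDfs g bt (f+1) V pos = ([], V) := by
  rw [bDfs_succ, if_neg hg, hm]

theorem bDfs_some (g : Int × Int) (bt : List (Int × Int × Int)) (f : Nat)
    (V : PySem.Set (Int × Int)) (pos nxt : Int × Int) (rest : List (Int × Int))
    (vis'' : PySem.Set (Int × Int)) (hg : ¬ pos = g)
    (hm : PySem.List.min? (candL bt V pos) (bMan g) = some nxt)
    (hrec : bDfs g bt f (PySem.Set.add V nxt) nxt = (rest, vis'')) :
    bDfs g bt (f+1) V pos =
      (if rest.isEmpty then bDfs g bt f vis'' pos else (pos :: rest, vis'')) := by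
  rw [bDfs_succ, if_neg hg, hm]
  have h2 : (match bDfs g bt f (PySem.Set.add V nxt) nxt with
      | (rest, vis'') => if rest.isEmpty then bDfs g bt f vis'' pos else (pos :: rest, vis''))
      = (if rest.isEmpty then bDfs g bt f vis'' pos else (pos :: rest, vis'')) := by
    rw [hrec]
  exact h2

theorem mem_candL {bt : List (Int × Int × Int)} {V : PySem.Set (Int × Int)}
    {pos q : Int × Int} (h : q ∈ candL bt V pos) : q ∈ bcells ∧ ¬ q ∈ V := by
  obtain ⟨-, h2⟩ := List.mem_filter.mp h
  simp only [Bool.and_eq_true, decide_eq_true_eq, Bool.not_eq_true'] at h2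
  obtain ⟨⟨⟨⟨⟨hq1, hq2⟩, hq3⟩, hq4⟩, hbm⟩, hvc⟩ := h2
  refine ⟨(mem_bcells q).mpr ⟨hq1, hq2, hq3, hq4⟩, fun hq => ?_⟩
  simp only [PySem.Set.contains] at hvc
  have hnv : q ∉ V := by simpa using hvc
  exact hnv hq

theorem bDfs_sub (g : Int × Int) (bt : List (Int × Int × Int)) :
    ∀ (f : Nat) (V : PySem.Set (Int × Int)) (pos x : Int × Int),
      x ∈ V → x ∈ (bDfs g bt f V pos).2 := by
  intro f
  induction f with
  | zero => intro V pos x hx; exact hx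
  | succ f ih =>
    intro V pos x hx
    by_cases hg : pos = g
    · rw [bDfs_goal _ _ _ _ _ hg]; exact hx
    · cases hm : PySem.List.min? (candL bt V pos) (bMan g) with
      | none => rw [bDfs_none _ _ _ _ _ hg hm]; exact hx
      | some nxt =>
        rcases hrec : bDfs g bt f (PySem.Set.add V nxt) nxt with ⟨rest, vis''⟩
        rw [bDfs_some _ _ _ _ _ _ _ _ hg hm hrec]
        have hx' : x ∈ PySem.Set.add V nxt := (PySem.Set.mem_add V nxt x).mpr (Or.inl hx)
        have hx'' : x ∈ vis'' := by
          have := ih (PySem.Set.add V nxt) nxt x hx'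
          rw [hrec] at this; exact this
        by_cases he : rest.isEmpty
        · rw [if_pos he]; exact ih vis'' pos x hx''
        · rw [if_neg he]; exact hx''

theorem bDfs_stable (g : Int × Int) (bt : List (Int × Int × Int)) :
    ∀ (u : Nat) (V : PySem.Set (Int × Int)), ucnt V = u →
      ∀ (f₁ f₂ : Nat) (pos : Int × Int), 2*u < f₁ → 2*u < f₂ →
        bDfs g bt f₁ V pos = bDfs g bt f₂ V pos := by
  intro u
  induction u using Nat.strong_induction_on with
  | _ u IH =>
    intro V hu f₁ f₂ pos h1 h2
    obtain ⟨a, rfl⟩ : ∃ a, f₁ = a + 1 := ⟨f₁ - 1, by omega⟩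
    obtain ⟨b, rfl⟩ : ∃ b, f₂ = b + 1 := ⟨f₂ - 1, by omega⟩
    by_cases hg : pos = g
    · rw [bDfs_goal _ _ _ _ _ hg, bDfs_goal _ _ _ _ _ hg]
    · cases hm : PySem.List.min? (candL bt V pos) (bMan g) with
      | none => rw [bDfs_none _ _ _ _ _ hg hm, bDfs_none _ _ _ _ _ hg hm]
      | some nxt =>
        obtain ⟨hb, hnv⟩ := mem_candL (PySem.List.min?_mem hm)
        have hlt : ucnt (PySem.Set.add V nxt) < u := hu ▸ ucnt_add_lt hb hnv
        have hchild : bDfs g bt a (PySem.Set.add V nxt) nxt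
            = bDfs g bt b (PySem.Set.add V nxt) nxt :=
          IH _ hlt _ rfl _ _ _ (by omega) (by omega)
        rcases hrec : bDfs g bt b (PySem.Set.add V nxt) nxt with ⟨rest, vis''⟩
        rw [bDfs_some _ _ _ _ _ _ _ _ hg hm (hchild.trans hrec),
          bDfs_some _ _ _ _ _ _ _ _ hg hm hrec]
        by_cases he : rest.isEmpty
        · rw [if_pos he, if_pos he]
          have hsub : ∀ x, x ∈ PySem.Set.add V nxt → x ∈ vis'' := by
            intro x hx
            have := bDfs_sub g bt b (PySem.Set.add V nxt) nxt x hx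
            rw [hrec] at this; exact this
          have hvc : ucnt vis'' ≤ ucnt (PySem.Set.add V nxt) := ucnt_mono hsub
          exact IH (ucnt vis'') (by omega) _ rfl _ _ _ (by omega) (by omega)
        · rw [if_neg he, if_neg he]

-- ---- the A-loop body, unfolded under the invariant hypotheses ----

def aBody (g : Int × Int) (bt : List (Int × Int × Int)) (f : Nat)
    (path : List (Int × Int)) (dict : PySem.Dict (Int × Int) Int)
    (failed : List (Int × Int)) (temp : Int × Int) : List (Int × Int) :=
  if temp = g then path
  else match dict.get? temp with
  | none => []
  | some c =>
    let possible3 := failed.foldl (fun l p => if l.contains p then l.erase p else l)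
      ((dict.keys).foldl (fun l p => if l.contains p then l.erase p else l)
        (aPruneLoop bt (((nbrs temp).length : Int) - 1) (nbrs temp)))
    if possible3.isEmpty then
      (if path.dropLast.isEmpty then []
       else aLoop g bt f path.dropLast dict (failed ++ [temp]))
    else match possible3 with
      | [] => []
      | c0 :: _ =>
        let np := (possible3.foldl (fun (acc : (Int × Int) × Int) p =>
            if get_dist (c+1) p g < acc.2 then (p, get_dist (c+1) p g) else acc)
          ((c0, get_dist (c+1) c0 g))).1
        aLoop g bt f (path ++ [np]) (dict.insert np (c+1)) failed

theorem aLoop_succ_eq (g : Int × Int) (bt : List (Int × Int × Int)) (f : Nat)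
    (path : List (Int × Int)) (dict : PySem.Dict (Int × Int) Int)
    (failed : List (Int × Int)) (temp : Int × Int)
    (hl : path.getLast? = some temp) :
    aLoop g bt (f+1) path dict failed = aBody g bt f path dict failed temp := by
  have h0 : aLoop g bt (f+1) path dict failed =
      (match path.getLast? with
       | none => []
       | some t => aBody g bt f path dict failed t) := rfl
  rw [h0, hl]

theorem aBody_goal (g : Int × Int) (bt : List (Int × Int × Int)) (f : Nat)
    (path : List (Int × Int)) (dict : PySem.Dict (Int × Int) Int)
    (failed : List (Int × Int)) (temp : Int × Int) (hg : temp = g) :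
    aBody g bt f path dict failed temp = path := by
  simp only [aBody]
  rw [if_pos hg]

theorem aBody_rest (g : Int × Int) (bt : List (Int × Int × Int)) (f : Nat)
    (path : List (Int × Int)) (dict : PySem.Dict (Int × Int) Int)
    (failed : List (Int × Int)) (temp : Int × Int) (c : Int) (hg : ¬ temp = g)
    (hc : dict.get? temp = some c) :
    aBody g bt f path dict failed temp =
      (let possible3 := failed.foldl (fun l p => if l.contains p then l.erase p else l)
        ((dict.keys).foldl (fun l p => if l.contains p then l.erase p else l)
          (aPruneLoop bt (((nbrs temp).length : Int) - 1) (nbrs temp)))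
      if possible3.isEmpty then
        (if path.dropLast.isEmpty then []
         else aLoop g bt f path.dropLast dict (failed ++ [temp]))
      else match possible3 with
        | [] => []
        | c0 :: _ =>
          let np := (possible3.foldl (fun (acc : (Int × Int) × Int) p =>
              if get_dist (c+1) p g < acc.2 then (p, get_dist (c+1) p g) else acc)
            ((c0, get_dist (c+1) c0 g))).1
          aLoop g bt f (path ++ [np]) (dict.insert np (c+1)) failed) := by
  simp only [aBody]
  rw [if_neg hg, hc]

-- ---- the driver: run the DFS from each stacked position in turn ----

def runDfs (g : Int × Int) (bt : List (Int × Int × Int)) (f : Nat) :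
    List (Int × Int) → PySem.Set (Int × Int) → List (Int × Int)
  | [], _ => []
  | p :: rest, V =>
    match bDfs g bt f V p with
    | (r, V') => if r.isEmpty then runDfs g bt f rest V' else rest.reverse ++ r

theorem runDfs_nil (g : Int × Int) (bt : List (Int × Int × Int)) (f : Nat)
    (V : PySem.Set (Int × Int)) : runDfs g bt f [] V = [] := rfl

theorem runDfs_cons (g : Int × Int) (bt : List (Int × Int × Int)) (f : Nat)
    (p : Int × Int) (rest : List (Int × Int)) (V V' : PySem.Set (Int × Int))
    (r : List (Int × Int)) (h : bDfs g bt f V p = (r, V')) :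
    runDfs g bt f (p :: rest) V
      = (if r.isEmpty then runDfs g bt f rest V' else rest.reverse ++ r) := by
  rw [runDfs, h]

-- ---- the simulation: A's stack machine runs B's DFS ----

theorem sim (g : Int × Int) (bt : List (Int × Int × Int)) (fb : Nat) :
    ∀ (fa : Nat) (rp : List (Int × Int)) (dict : PySem.Dict (Int × Int) Int)
      (failed : List (Int × Int)) (V : PySem.Set (Int × Int)),
      rp ≠ [] →
      (∀ q ∈ rp, q ∈ dict.keys) →
      (∀ q : Int × Int, (q ∈ dict.keys ∨ q ∈ failed) ↔ q ∈ V) →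
      2 * ucnt V + rp.length < fa →
      2 * ucnt V < fb →
      aLoop g bt fa rp.reverse dict failed = runDfs g bt fb rp V := by
  intro fa
  induction fa with
  | zero =>
    intro rp dict failed V hne _ _ hfa _
    omega
  | succ fa ih =>
    intro rp dict failed V hne hstk hRel hfa hfb
    obtain ⟨p, rest, rfl⟩ : ∃ p rest, rp = p :: rest := by
      cases rp with
      | nil => exact absurd rfl hne
      | cons p rest => exact ⟨p, rest, rfl⟩
    obtain ⟨b, rfl⟩ : ∃ b, fb = b + 1 := ⟨fb - 1, by omega⟩
    have hlast : ((p :: rest).reverse).getLast? = some p := by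
      rw [List.getLast?_reverse]; rfl
    rw [aLoop_succ_eq _ _ _ _ _ _ _ hlast]
    have hdrop : ((p :: rest).reverse).dropLast = rest.reverse := by
      rw [List.reverse_cons, List.dropLast_concat]
    by_cases hg : p = g
    · rw [aBody_goal _ _ _ _ _ _ _ hg]
      rw [runDfs_cons _ _ _ _ _ _ _ _ (bDfs_goal _ _ b _ _ hg)]
      rw [if_neg (by simp)]
      rw [List.reverse_cons]
    · -- p is not the goal: get its dict entry and the candidate list
      have hcont : dict.contains p = true :=
        (PySem.Dict.contains_iff_mem_keys dict p).mpr (hstk p (List.mem_cons_self))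
      obtain ⟨c, hcp⟩ : ∃ c, dict.get? p = some c := by
        rw [PySem.Dict.contains_eq_isSome_get?] at hcont
        exact Option.isSome_iff_exists.mp hcont
      rw [aBody_rest _ _ _ _ _ _ _ _ hg hcp]
      rw [cand_eq bt dict failed V hRel p]
      cases hC : candL bt V p with
      | nil =>
        -- no candidates: A pops, B's dfs fails
        have hmin : PySem.List.min? (candL bt V p) (bMan g) = none := by
          rw [hC]; rfl
        rw [runDfs_cons _ _ _ _ _ _ _ _ (bDfs_none _ _ b _ _ hg hmin)]
        simp only [List.isEmpty_nil, reduceIte]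
        rw [hdrop]
        cases rest with
        | nil => simp [runDfs_nil]
        | cons q rs =>
          rw [if_neg (by simp)]
          have hstk' : ∀ x ∈ (q :: rs), x ∈ dict.keys := fun x hx =>
            hstk x (List.mem_cons_of_mem _ hx)
          have hRel' : ∀ x : Int × Int,
              (x ∈ dict.keys ∨ x ∈ failed ++ [p]) ↔ x ∈ V := by
            intro x
            rw [← hRel x]
            constructor
            · rintro (h | h)
              · exact Or.inl h
              · rcases List.mem_append.mp h with h' | h'
                · exact Or.inr h'
                · simp only [List.mem_singleton] at h'
                  exact Or.inl (h' ▸ hstk p List.mem_cons_self)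
            · rintro (h | h)
              · exact Or.inl h
              · exact Or.inr (List.mem_append_left _ h)
          exact ih (q :: rs) dict (failed ++ [p]) V (by simp) hstk' hRel'
            (by simp at hfa ⊢; omega) hfb
      | cons c0 t =>
        simp only [List.isEmpty_cons]
        rw [if_neg (by simp)]
        -- the first-minimum A picks is the min? B picks
        have hmin : PySem.List.min? (candL bt V p) (bMan g)
            = some (((c0 :: t).foldl (fun (acc : (Int × Int) × Int) q =>
                if get_dist (c+1) q g < acc.2 then (q, get_dist (c+1) q g) else acc)
              ((c0, get_dist (c+1) c0 g))).1) := by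
          rw [hC]; exact scan_min? (c+1) g c0 t
        set np := ((c0 :: t).foldl (fun (acc : (Int × Int) × Int) q =>
            if get_dist (c+1) q g < acc.2 then (q, get_dist (c+1) q g) else acc)
          ((c0, get_dist (c+1) c0 g))).1 with hnp
        have hnpc : np ∈ candL bt V p := PySem.List.min?_mem hmin
        obtain ⟨hnb, hnv⟩ := mem_candL hnpc
        have hucnt : ucnt (PySem.Set.add V np) < ucnt V := ucnt_add_lt hnb hnv
        have hpush : (p :: rest).reverse ++ [np] = (np :: p :: rest).reverse := by simp
        rw [hpush]
        have hstk' : ∀ x ∈ (np :: p :: rest), x ∈ (dict.insert np (c+1)).keys := by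
          intro x hx
          rcases List.mem_cons.mp hx with hxe | hx'
          · exact (PySem.Dict.mem_keys_insert dict np x (c+1)).mpr (Or.inl hxe)
          · exact (PySem.Dict.mem_keys_insert dict np x (c+1)).mpr (Or.inr (hstk x hx'))
        have hRel' : ∀ x : Int × Int,
            (x ∈ (dict.insert np (c+1)).keys ∨ x ∈ failed) ↔ x ∈ PySem.Set.add V np := by
          intro x
          rw [PySem.Set.mem_add]
          constructor
          · rintro (h | h)
            · rcases (PySem.Dict.mem_keys_insert dict np x (c+1)).mp h with rfl | h'
              · exact Or.inr rfl
              · exact Or.inl ((hRel x).mp (Or.inl h'))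
            · exact Or.inl ((hRel x).mp (Or.inr h))
          · rintro (h | h)
            · rcases (hRel x).mpr h with h' | h'
              · exact Or.inl ((PySem.Dict.mem_keys_insert dict np x (c+1)).mpr (Or.inr h'))
              · exact Or.inr h'
            · exact Or.inl ((PySem.Dict.mem_keys_insert dict np x (c+1)).mpr (Or.inl h))
        have hrec := ih (np :: p :: rest) (dict.insert np (c+1)) failed (PySem.Set.add V np)
          (by simp) hstk' hRel' (by simp at hfa ⊢; omega) (by omega)
        rw [hrec]
        -- now: entering the child then continuing equals one unfolding of dfs at p
        have hstab : bDfs g bt (b+1) (PySem.Set.add V np) np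
            = bDfs g bt b (PySem.Set.add V np) np :=
          bDfs_stable g bt (ucnt (PySem.Set.add V np)) _ rfl _ _ _ (by omega) (by omega)
        rcases hrec0 : bDfs g bt b (PySem.Set.add V np) np with ⟨r0, V0⟩
        rw [runDfs_cons _ _ _ _ _ _ _ _ (hstab.trans hrec0)]
        by_cases he : r0.isEmpty
        · rw [if_pos he]
          -- the retry: both sides continue the dfs at p with visited V0
          have hsub0 : ∀ x, x ∈ PySem.Set.add V np → x ∈ V0 := by
            intro x hx
            have := bDfs_sub g bt b (PySem.Set.add V np) np x hx
            rw [hrec0] at this; exact this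
          have hv0 : ucnt V0 ≤ ucnt (PySem.Set.add V np) := ucnt_mono hsub0
          have hstab2 : bDfs g bt (b+1) V0 p = bDfs g bt b V0 p :=
            bDfs_stable g bt (ucnt V0) _ rfl _ _ _ (by omega) (by omega)
          rcases hrec1 : bDfs g bt b V0 p with ⟨r1, V1⟩
          rw [runDfs_cons _ _ _ _ _ _ _ _ (hstab2.trans hrec1)]
          rw [runDfs_cons _ _ _ _ _ _ _ _
            ((bDfs_some g bt b V p np r0 V0 hg hmin hrec0).trans (by rw [if_pos he, hrec1]))]
        · rw [if_neg he]
          rw [runDfs_cons _ _ _ _ _ _ _ _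
            ((bDfs_some g bt b V p np r0 V0 hg hmin hrec0).trans (by rw [if_neg he]))]
          rw [if_neg (by simp [List.isEmpty_iff])]
          rw [List.reverse_cons, List.append_assoc]
          rfl

theorem ucnt_le (V : PySem.Set (Int × Int)) : ucnt V ≤ 64 := by
  have h1 : ucnt V ≤ bcells.length := List.countP_le_length
  have h2 : bcells.length = 64 := rfl
  omega

theorem path_search_main : ∀ (w g : Int × Int) (bt : List (Int × Int × Int)),
    path_search w g bt = path_search_alt w g bt := by
  intro w g bt
  have hdict : PySem.Dict.ofList [(w, (0 : Int))] = PySem.Dict.empty.insert w 0 := rfl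
  have hset : PySem.Set.ofList [w] = PySem.Set.add PySem.Set.empty w := rfl
  have hrun : aLoop g bt 200 [w].reverse (PySem.Dict.ofList [(w, (0 : Int))]) []
      = runDfs g bt 200 [w] (PySem.Set.ofList [w]) := by
    refine sim g bt 200 200 [w] (PySem.Dict.ofList [(w, (0 : Int))]) []
      (PySem.Set.ofList [w]) (by simp) ?_ ?_ ?_ ?_
    · intro q hq
      simp only [List.mem_singleton] at hq
      rw [hdict, hq]
      exact (PySem.Dict.mem_keys_insert _ _ _ _).mpr (Or.inl rfl)
    · intro q
      rw [hdict]
      constructor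
      · rintro (h | h)
        · rcases (PySem.Dict.mem_keys_insert _ _ _ _).mp h with hqw | h'
          · exact (PySem.Set.mem_ofList [w] q).mpr (by simp [hqw])
          · simp [PySem.Dict.keys_empty] at h'
        · simp at h
      · intro h
        have := (PySem.Set.mem_ofList [w] q).mp h
        simp only [List.mem_singleton] at this
        exact Or.inl ((PySem.Dict.mem_keys_insert _ _ _ _).mpr (Or.inl this))
    · have := ucnt_le (PySem.Set.ofList [w])
      simp only [List.length_singleton]
      omega
    · have := ucnt_le (PySem.Set.ofList [w]); omega
  have hl : ([w] : List (Int × Int)).reverse = [w] := rfl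
  rw [hl] at hrun
  unfold path_search path_search_alt
  rw [hrun]
  rcases hfinal : bDfs g bt 200 (PySem.Set.ofList [w]) w with ⟨r, V'⟩
  rw [runDfs_cons _ _ _ _ _ _ _ _ hfinal]
  by_cases he : r.isEmpty
  · rw [if_pos he, runDfs_nil]
    simp only [List.isEmpty_iff] at he
    simp [he]
  · rw [if_neg he]
    simp


-- ===== VERDICT (by name: the statement is the Claim_ definition above) =====
theorem path_search_spec : Claim_equal_path_search := by
  intro w g bt _
  unfold Spec_path_search
  exact path_search_main w g bt
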